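-- pv_equiv track=rewrite | github.com/fbal98/excel-ai-openai-agents | src/agent_core.py | _compact_headers
-- ===== SOURCE A (Python) =====
-- def _compact_headers(headers):
--     """
--     Compacts header representations to reduce token usage.
--     Converts repetitive empty headers to a more compact form.
--
--     Examples:
--     - ["Name", "", "", "", "Date"] -> ["Name", "...", "Date"]
--     - ["", "", "", ""] -> [] (all empty case)
--     - ["Name", "Age", "Email"] -> ["Name", "Age", "Email"] (no change needed)
--     """
--     if not headers:
--         return []
--
--     # If we already have few headers or none are empty, return as is
--     empty_count = sum(1 for h in headers if not h)
--     if len(headers) <= 10 or empty_count == 0: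
--         return headers
--
--     # If all headers are empty, return an empty list
--     if empty_count == len(headers):
--         return []
--
--     # Compact format: find meaningful headers and compress empty spans
--     result = []
--     empty_streak = 0
--
--     for i, header in enumerate(headers):
--         if not header:  # Empty header
--             empty_streak += 1
--             # Only add ellipsis if we've seen 3+ consecutive empty headers
--             # and haven't already added an ellipsis
--             if empty_streak == 3 and (not result or result[-1] != "..."):
--                 result.append("...")
--         else:  # Non-empty header
--             empty_streak = 0
--             result.append(str(header)) # Ensure string conversion
--
--     # Remove trailing ellipsis if present
--     if result and result[-1] == "...":
--         result.pop()
--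
--     return result
-- ===== SOURCE B (Python) =====
-- def _run_span(key, xs):
--     """Longest prefix of xs whose elements have emptiness == key, plus the rest."""
--     run = []
--     i = 0
--     while i < len(xs) and (not xs[i]) == key:
--         run.append(xs[i])
--         i += 1
--     return run, xs[i:]
--
--
-- def _compact_headers(headers):
--     if not headers:
--         return []
--     empty_count = sum(1 for h in headers if not h)
--     if len(headers) <= 10 or empty_count == 0:
--         return headers
--     if empty_count == len(headers):
--         return []
--     result = []
--     rest = headers
--     while rest:
--         key = not rest[0]
--         tail_run, rest2 = _run_span(key, rest[1:])
--         run = [rest[0]] + tail_run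
--         if key:
--             # a maximal run of empties becomes one "..." only if it is long enough
--             if len(run) >= 3 and (not result or result[-1] != "..."):
--                 result.append("...")
--         else:
--             result.extend(str(h) for h in run)
--         rest = rest2
--     if result and result[-1] == "...":
--         result.pop()
--     return result
-- ===== Notes on version B (the rewrite author's own statement) =====
-- stated objective: alternative
-- what changed: B replaces A's per-element loop with a streak counter by an explicit decomposition of the list into maximal runs of equal emptiness (a hand-rolled groupby), emitting one '...' per long-enough empty run and the elements of each non-empty run.
import Mathlib
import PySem

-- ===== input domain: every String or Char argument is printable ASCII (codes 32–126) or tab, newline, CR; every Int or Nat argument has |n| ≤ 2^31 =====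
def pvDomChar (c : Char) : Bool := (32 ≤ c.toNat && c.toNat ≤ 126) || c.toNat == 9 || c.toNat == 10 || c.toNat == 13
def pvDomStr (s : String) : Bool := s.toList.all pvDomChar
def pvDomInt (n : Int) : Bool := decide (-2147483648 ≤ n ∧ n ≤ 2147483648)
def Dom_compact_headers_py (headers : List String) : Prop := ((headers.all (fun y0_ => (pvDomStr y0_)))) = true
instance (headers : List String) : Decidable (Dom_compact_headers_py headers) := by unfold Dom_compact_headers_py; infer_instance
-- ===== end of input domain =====

-- ===== PORT A =====
-- B replaces A's streak-counter pass by an explicit maximal-run decomposition; same O(n) cost.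
def loopA : List String → List String → Nat → List String
  | [], res, _ => res
  | h :: t, res, streak =>
    if h = "" then
      loopA t (if streak + 1 = 3 ∧ res.getLast? ≠ some "..." then res ++ ["..."] else res) (streak + 1)
    else
      loopA t (res ++ [h]) 0

def compact_headers_py (headers : List String) : List String :=
  if headers = [] then []
  else
    let empty_count := (headers.filter (fun h => h = "")).length
    if headers.length ≤ 10 ∨ empty_count = 0 then headers
    else if empty_count = headers.length then []
    else
      let res := loopA headers [] 0
      if res.getLast? = some "..." then res.dropLast else res

-- ===== PORT B =====
-- _run_span: longest prefix whose elements have emptiness = key, plus the rest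
def runSpan (key : Bool) : List String → List String × List String
  | [] => ([], [])
  | h :: t =>
    if (h == "") = key then
      let p := runSpan key t
      (h :: p.1, p.2)
    else ([], h :: t)

theorem runSpan_rest_length (key : Bool) (t : List String) :
    (runSpan key t).2.length ≤ t.length := by
  induction t with
  | nil => simp [runSpan]
  | cons h t ih =>
    simp only [runSpan]
    split
    · simpa using Nat.le_succ_of_le ih
    · simp

def loopB : List String → List String → List String
  | [], res => res
  | h :: t, res =>
    loopB (runSpan (h == "") t).2
      (if h == "" then
        (if 3 ≤ (h :: (runSpan (h == "") t).1).length ∧ res.getLast? ≠ some "..." then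
          res ++ ["..."] else res)
       else res ++ h :: (runSpan (h == "") t).1)
termination_by rest _ => rest.length
decreasing_by
  exact Nat.lt_succ_of_le (runSpan_rest_length _ _)

def compact_headers_py_alt (headers : List String) : List String :=
  if headers = [] then []
  else
    let empty_count := (headers.filter (fun h => h = "")).length
    if headers.length ≤ 10 ∨ empty_count = 0 then headers
    else if empty_count = headers.length then []
    else
      let res := loopB headers []
      if res.getLast? = some "..." then res.dropLast else res

-- ===== PRECONDITION & SPEC =====
def Spec_compact_headers_py (headers : List String) (out : List String) : Prop := out = compact_headers_py_alt headers
instance (headers : List String) (out : List String) : Decidable (Spec_compact_headers_py headers out) := by unfold Spec_compact_headers_py; infer_instance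

-- ===== CLAIM (what is proved, stated in full; the proofs are below) =====
def Claim_equal_compact_headers_py : Prop := ∀ (headers : List String), Dom_compact_headers_py headers → Spec_compact_headers_py headers (compact_headers_py headers)

-- ===== LEMMAS AND PROOFS =====

theorem runSpan_append (key : Bool) (t : List String) :
    (runSpan key t).1 ++ (runSpan key t).2 = t := by
  induction t with
  | nil => simp [runSpan]
  | cons h t ih =>
    simp only [runSpan]
    split
    · simpa using ih
    · simp

theorem runSpan_mem (key : Bool) (t : List String) :
    ∀ x ∈ (runSpan key t).1, (x == "") = key := by
  induction t with
  | nil => simp [runSpan]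
  | cons h t ih =>
    simp only [runSpan]
    split
    · rename_i hk
      intro x hx
      rcases List.mem_cons.mp hx with h1 | h2
      · subst h1; exact hk
      · exact ih x h2
    · simp

theorem runSpan_rest (key : Bool) (t : List String) :
    ∀ h' t', (runSpan key t).2 = h' :: t' → (h' == "") ≠ key := by
  induction t with
  | nil => simp [runSpan]
  | cons h t ih =>
    simp only [runSpan]
    split
    · exact ih
    · rename_i hk
      intro h' t' he
      cases he
      exact hk

-- L1: A's loop on a block of empties, starting from streak s
theorem loopA_empty_block (run : List String) (hall : ∀ x ∈ run, x = "") :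
    ∀ (rest res : List String) (s : Nat),
      loopA (run ++ rest) res s =
        loopA rest
          (if s < 3 ∧ 3 ≤ s + run.length ∧ res.getLast? ≠ some "..." then res ++ ["..."] else res)
          (s + run.length) := by
  induction run with
  | nil =>
    intro rest res s
    simp only [List.nil_append, List.length_nil, Nat.add_zero]
    rw [if_neg (by rintro ⟨a, b, -⟩; omega)]
  | cons h t ih =>
    intro rest res s
    have hh : h = "" := hall h (List.mem_cons_self ..)
    have hall' : ∀ x ∈ t, x = "" := fun x hx => hall x (List.mem_cons_of_mem _ hx)
    subst hh
    simp only [List.cons_append, loopA, reduceIte, List.length_cons]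
    rw [ih hall' rest _ (s + 1)]
    simp only [show s + (t.length + 1) = s + 1 + t.length from by omega]
    by_cases h3 : s + 1 = 3 ∧ res.getLast? ≠ some "..."
    · obtain ⟨h31, h32⟩ := h3
      rw [if_pos (show s + 1 = 3 ∧ res.getLast? ≠ some "..." from ⟨h31, h32⟩)]
      have hl : (res ++ ["..."]).getLast? = some "..." := by simp
      rw [if_neg (show ¬(s + 1 < 3 ∧ 3 ≤ s + 1 + t.length ∧
            (res ++ ["..."]).getLast? ≠ some "...") from fun hx => hx.2.2 hl)]
      rw [if_pos (show s < 3 ∧ 3 ≤ s + 1 + t.length ∧ res.getLast? ≠ some "..." from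
            ⟨by omega, by omega, h32⟩)]
    · rw [if_neg h3]
      have hcond : (s + 1 < 3 ∧ 3 ≤ s + 1 + t.length ∧ res.getLast? ≠ some "...") ↔
          (s < 3 ∧ 3 ≤ s + 1 + t.length ∧ res.getLast? ≠ some "...") := by
        constructor
        · rintro ⟨a, b, c⟩; exact ⟨by omega, b, c⟩
        · rintro ⟨a, b, c⟩
          refine ⟨?_, b, c⟩
          by_cases he : s + 1 = 3
          · exact absurd ⟨he, c⟩ h3
          · omega
      by_cases hc : s < 3 ∧ 3 ≤ s + 1 + t.length ∧ res.getLast? ≠ some "..."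
      · rw [if_pos (hcond.mpr hc), if_pos hc]
      · rw [if_neg (fun hx => hc (hcond.mp hx)), if_neg hc]

-- L2: A's loop on a block of non-empties appends the block and resets the streak
theorem loopA_nonempty_block (run : List String) (hall : ∀ x ∈ run, x ≠ "") :
    ∀ (rest res : List String) (s : Nat),
      loopA (run ++ rest) res s = loopA rest (res ++ run) (if run = [] then s else 0) := by
  induction run with
  | nil => intro rest res s; simp
  | cons h t ih =>
    intro rest res s
    have hh : h ≠ "" := hall h (List.mem_cons_self ..)
    have hall' : ∀ x ∈ t, x ≠ "" := fun x hx => hall x (List.mem_cons_of_mem _ hx)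
    simp only [List.cons_append, loopA, if_neg hh]
    rw [ih hall' rest (res ++ [h]) 0]
    cases t with
    | nil => simp
    | cons a b => simp

-- L3: the streak value is irrelevant when the next element (if any) is non-empty
theorem loopA_reset (rest res : List String) (s : Nat)
    (h : rest = [] ∨ ∃ h' t', rest = h' :: t' ∧ h' ≠ "") :
    loopA rest res s = loopA rest res 0 := by
  rcases h with h | ⟨h', t', he, hne⟩
  · subst h; rfl
  · subst he
    simp only [loopA, if_neg hne]

-- Main loop lemma: A's streak loop equals B's run loop
theorem loopA_eq_loopB (rest : List String) : ∀ res, loopA rest res 0 = loopB rest res := by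
  induction rest using (measure List.length).wf.induction with
  | _ rest ih =>
  intro res
  cases rest with
  | nil => simp [loopA, loopB]
  | cons h t =>
    rcases hsp : runSpan (h == "") t with ⟨r, rest2⟩
    have hlen : rest2.length < (h :: t).length := by
      have := runSpan_rest_length (h == "") t
      rw [hsp] at this
      exact Nat.lt_succ_of_le this
    have hsplit : r ++ rest2 = t := by
      have := runSpan_append (h == "") t
      rwa [hsp] at this
    have hmem : ∀ x ∈ r, (x == "") = (h == "") := by
      have := runSpan_mem (h == "") t
      rwa [hsp] at this
    have hrest : ∀ h' t', rest2 = h' :: t' → (h' == "") ≠ (h == "") := by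
      have := runSpan_rest (h == "") t
      rwa [hsp] at this
    have heq : h :: t = (h :: r) ++ rest2 := by
      simp [hsplit]
    by_cases hk : h = ""
    · -- empty run
      have hkey : (h == "") = true := by simp [hk]
      have hall : ∀ x ∈ h :: r, x = "" := by
        intro x hx
        rcases List.mem_cons.mp hx with h1 | h2
        · exact h1.trans hk
        · have := hmem x h2
          rw [hkey] at this
          exact eq_of_beq this
      have hshape : rest2 = [] ∨ ∃ h' t', rest2 = h' :: t' ∧ h' ≠ "" := by
        cases hr : rest2 with
        | nil => exact Or.inl rfl
        | cons a b =>
          refine Or.inr ⟨a, b, rfl, fun hae => ?_⟩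
          have := hrest a b hr
          rw [hkey] at this
          exact this (by simp [hae])
      have hrhs : loopB (h :: t) res =
          loopB rest2
            (if 3 ≤ (h :: r).length ∧ res.getLast? ≠ some "..." then res ++ ["..."] else res) := by
        rw [loopB, hsp, hkey]
        simp
      conv_lhs => rw [heq]
      rw [loopA_empty_block _ hall rest2 res 0, loopA_reset _ _ _ hshape, ih rest2 hlen, hrhs]
      congr 1
      simp only [Nat.zero_add]
      by_cases hc : 3 ≤ (h :: r).length ∧ res.getLast? ≠ some "..."
      · rw [if_pos ⟨by omega, hc.1, hc.2⟩, if_pos hc]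
      · rw [if_neg (fun hx => hc ⟨hx.2.1, hx.2.2⟩), if_neg hc]
    · -- non-empty run
      have hkey : (h == "") = false := by simp [hk]
      have hall : ∀ x ∈ h :: r, x ≠ "" := by
        intro x hx
        rcases List.mem_cons.mp hx with h1 | h2
        · exact h1 ▸ hk
        · intro hae
          have := hmem x h2
          rw [hkey, hae] at this
          simp at this
      have hrhs : loopB (h :: t) res = loopB rest2 (res ++ h :: r) := by
        rw [loopB, hsp, hkey]
        simp
      conv_lhs => rw [heq]
      rw [loopA_nonempty_block _ hall rest2 res 0, ite_self, ih rest2 hlen, hrhs]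

-- ===== VERDICT (by name: the statement is the Claim_ definition above) =====
theorem compact_headers_py_spec : Claim_equal_compact_headers_py := by
  intro headers _
  unfold Spec_compact_headers_py
  simp only [compact_headers_py, compact_headers_py_alt, loopA_eq_loopB]
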